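-- pv_equiv track=rewrite | github.com/YouBetCoder/CrashServer | ltsm/pythonProject/teacup.py | detect_enders_teacup
-- ===== SOURCE A (Python) =====
-- def detect_enders_teacup(numbers):
--     """Detects the 'Ender's Teacup' pattern in a list of numbers, ensuring in-order.
--
--     Args:
--       numbers: A list of numbers.
--
--     Returns:
--       True if the pattern is detected, False otherwise.
--     """
--
--     # Check for sufficient length
--     if len(numbers) < 4:
--         return False
--
--     # Extract large and small numbers
--     large_numbers = numbers[:2]
--     small_numbers = numbers
--
--     # # Check if large numbers are greater than 30
--     # if not all(num > 10 for num in large_numbers):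
--     #     return False
--
--     # Check if small numbers are between 1 and 2
--     if not all(1 <= num <= 2 for num in small_numbers):
--         return False
--
--     # Check for descending order
--     if not all(numbers[i] >= numbers[i + 1] for i in range(len(numbers) - 1)):
--         return False
--
--     return True
-- ===== SOURCE B (Python) =====
-- def detect_enders_teacup(numbers):
--     if len(numbers) < 4:
--         return False
--     if not all(1 <= num <= 2 for num in numbers):
--         return False
--     return numbers == sorted(numbers, reverse=True)
-- ===== Notes on version B (the rewrite author's own statement) =====
-- stated objective: idiomatic
-- what changed: The adjacent-pair index scan all(numbers[i] >= numbers[i+1] for i in range(len(numbers)-1)) is replaced by comparing the list with its reverse-sorted copy (numbers == sorted(numbers, reverse=True)).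
import Mathlib
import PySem

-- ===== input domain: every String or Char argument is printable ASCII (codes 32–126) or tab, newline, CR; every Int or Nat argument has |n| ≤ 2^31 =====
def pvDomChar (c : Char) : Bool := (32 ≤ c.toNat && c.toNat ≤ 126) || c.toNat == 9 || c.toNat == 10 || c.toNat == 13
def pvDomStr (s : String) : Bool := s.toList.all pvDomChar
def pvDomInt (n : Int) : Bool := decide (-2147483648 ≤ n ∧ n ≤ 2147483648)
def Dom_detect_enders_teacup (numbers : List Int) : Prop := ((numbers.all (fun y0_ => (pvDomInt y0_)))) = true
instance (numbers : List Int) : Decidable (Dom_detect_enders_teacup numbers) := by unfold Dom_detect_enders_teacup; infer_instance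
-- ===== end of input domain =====

-- B replaces A's adjacent-pair index scan for the descending check with an idiomatic
-- compare-against-reverse-sorted-copy; equal return value on all Int lists (proved below).


-- ===== PORT A =====
def detect_enders_teacup (numbers : List Int) : Bool :=
  if numbers.length < 4 then false
  else
    let _large_numbers := PySem.List.slice numbers none (some 2)
    let small_numbers := numbers
    if !(small_numbers.all (fun num => decide (1 ≤ num) && decide (num ≤ 2))) then false
    else if !((PySem.List.pyRange 0 ((numbers.length : Int) - 1) 1).all
        (fun i => decide (PySem.List.pyGetD numbers (i + 1) 0 ≤ PySem.List.pyGetD numbers i 0)))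
      then false
    else true

-- ===== PORT B =====
def detect_enders_teacup_alt (numbers : List Int) : Bool :=
  if numbers.length < 4 then false
  else if !(numbers.all (fun num => decide (1 ≤ num) && decide (num ≤ 2))) then false
  else numbers == PySem.List.sorted numbers (fun x => x) true

-- ===== PRECONDITION & SPEC =====
def Spec_detect_enders_teacup (numbers : List Int) (out : Bool) : Prop := out = detect_enders_teacup_alt numbers
instance (numbers : List Int) (out : Bool) : Decidable (Spec_detect_enders_teacup numbers out) := by unfold Spec_detect_enders_teacup; infer_instance

-- ===== CLAIM (what is proved, stated in full; the proofs are below) =====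
def Claim_equal_detect_enders_teacup : Prop := ∀ (numbers : List Int), Dom_detect_enders_teacup numbers → Spec_detect_enders_teacup numbers (detect_enders_teacup numbers)

-- ===== LEMMAS AND PROOFS =====
-- B changes the descending test to a sort-then-compare; equal return value proved below.

-- ===== VERDICT (by name: the statement is the Claim_ definition above) =====
-- the adjacent-pair scan succeeds iff the list is non-increasing
lemma scan_iff (numbers : List Int) :
    ((PySem.List.pyRange 0 ((numbers.length : Int) - 1) 1).all
        (fun i => decide (PySem.List.pyGetD numbers (i + 1) 0 ≤ PySem.List.pyGetD numbers i 0)))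
      = (numbers == PySem.List.sorted numbers (fun x => x) true) := by
  rw [Bool.eq_iff_iff]
  simp only [List.all_eq_true, beq_iff_eq, decide_eq_true_eq]
  have hpair : (∀ a ∈ PySem.List.pyRange 0 ((numbers.length : Int) - 1) 1,
      PySem.List.pyGetD numbers (a + 1) 0 ≤ PySem.List.pyGetD numbers a 0)
      ↔ numbers.Pairwise (fun a b => b ≤ a) := by
    rw [← List.isChain_iff_pairwise, List.isChain_iff_getElem]
    constructor
    · intro h i hi
      have ha := h (i : Int) (by rw [PySem.List.mem_pyRange_one]; omega)
      rw [PySem.List.pyGetD_eq_getElem numbers (i := (i : Int) + 1) 0 (by omega) (by omega),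
          PySem.List.pyGetD_eq_getElem numbers (i := (i : Int)) 0 (by omega) (by omega)] at ha
      simpa using ha
    · intro h a ha
      rw [PySem.List.mem_pyRange_one] at ha
      rw [PySem.List.pyGetD_eq_getElem numbers (i := a + 1) 0 (by omega) (by omega),
          PySem.List.pyGetD_eq_getElem numbers (i := a) 0 (by omega) (by omega)]
      have := h a.toNat (by omega)
      convert this using 3 ; omega
  rw [hpair]
  constructor
  · intro h
    exact (PySem.List.sorted_rev_eq_self_of_pairwise numbers (fun x => x) h).symm
  · intro h
    have := PySem.List.sorted_pairwise_rev (xs := numbers) (key := fun (x : Int) => x)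
    rw [← h] at this
    exact this

theorem detect_enders_teacup_spec : Claim_equal_detect_enders_teacup := by
  intro numbers hdom
  clear hdom
  unfold Spec_detect_enders_teacup detect_enders_teacup detect_enders_teacup_alt
  rw [scan_iff]
  dsimp only
  split_ifs with h1 h2 h3
  · rfl
  · rfl
  · simp only [Bool.not_eq_true'] at h3
    exact h3.symm
  · simp only [Bool.not_eq_true', Bool.not_eq_false] at h3
    exact h3.symm
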